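-- pv_equiv track=rewrite | github.com/TheMindBreaker/PyFinal | actividad2/main.py | ordena_ABC
-- ===== SOURCE A (Python) =====
-- def ordena_ABC(lista):
--     orden = [[],[],[],[]]
--     for i in lista:
--         for k in i:
--             if(k.startswith('a') or k.startswith('A')):
--                 orden[0].append(k)
--             elif(k.startswith('b') or k.startswith('B')):
--                 orden[1].append(k)
--             elif(k.startswith('c') or k.startswith('C')):
--                 orden[2].append(k)
--             else:
--                 orden[3].append(k)
--     return orden
-- ===== SOURCE B (Python) =====
-- def ordena_ABC(lista):
--     flat = [k for i in lista for k in i]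
--     a = [k for k in flat if k.startswith('a') or k.startswith('A')]
--     b = [k for k in flat if k.startswith('b') or k.startswith('B')]
--     c = [k for k in flat if k.startswith('c') or k.startswith('C')]
--     otros = [k for k in flat
--              if not (k.startswith('a') or k.startswith('A')
--                      or k.startswith('b') or k.startswith('B')
--                      or k.startswith('c') or k.startswith('C'))]
--     return [a, b, c, otros]
-- ===== Notes on version B (the rewrite author's own statement) =====
-- stated objective: simpler
-- what changed: Replaces the single stateful nested loop with an if/elif chain appending into a mutable 4-list by a flatten pass plus four independent list comprehensions, one per bucket (the bucket predicates are mutually exclusive so the elif chain is not needed).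
import Mathlib
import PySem

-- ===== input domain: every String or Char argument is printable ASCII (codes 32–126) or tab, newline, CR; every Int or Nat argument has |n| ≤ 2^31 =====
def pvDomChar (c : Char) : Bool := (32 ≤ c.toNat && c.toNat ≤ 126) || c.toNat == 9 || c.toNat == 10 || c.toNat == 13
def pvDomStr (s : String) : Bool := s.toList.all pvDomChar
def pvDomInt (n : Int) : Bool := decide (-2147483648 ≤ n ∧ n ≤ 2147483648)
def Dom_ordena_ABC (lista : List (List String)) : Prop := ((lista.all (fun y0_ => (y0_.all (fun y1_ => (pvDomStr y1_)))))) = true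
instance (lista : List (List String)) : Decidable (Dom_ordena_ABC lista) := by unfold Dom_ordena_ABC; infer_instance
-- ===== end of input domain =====

-- B replaces A's single nested loop with an if/elif chain over a mutable 4-list by a flatten
-- pass plus four independent per-bucket filters (simpler decomposition; same O(n) cost).


-- ===== PORT A =====
-- bucket predicates, shared spelling of "k.startswith('x') or k.startswith('X')"
def pvIsA (k : String) : Bool := PySem.Str.startswith k "a" || PySem.Str.startswith k "A"
def pvIsB (k : String) : Bool := PySem.Str.startswith k "b" || PySem.Str.startswith k "B"
def pvIsC (k : String) : Bool := PySem.Str.startswith k "c" || PySem.Str.startswith k "C"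

-- one iteration of A's inner loop body: append k to the bucket the if/elif chain selects
def pvStepA (st : List String × List String × List String × List String) (k : String) :
    List String × List String × List String × List String :=
  if pvIsA k then (st.1 ++ [k], st.2.1, st.2.2.1, st.2.2.2)
  else if pvIsB k then (st.1, st.2.1 ++ [k], st.2.2.1, st.2.2.2)
  else if pvIsC k then (st.1, st.2.1, st.2.2.1 ++ [k], st.2.2.2)
  else (st.1, st.2.1, st.2.2.1, st.2.2.2 ++ [k])

def ordena_ABC (lista : List (List String)) : List (List String) :=
  let orden := lista.foldl (fun st i => i.foldl pvStepA st) ([], [], [], [])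
  [orden.1, orden.2.1, orden.2.2.1, orden.2.2.2]

-- ===== PORT B =====
def ordena_ABC_alt (lista : List (List String)) : List (List String) :=
  let flat := lista.flatMap (fun i => i)
  [flat.filter (fun k => pvIsA k),
   flat.filter (fun k => pvIsB k),
   flat.filter (fun k => pvIsC k),
   flat.filter (fun k => !(pvIsA k || pvIsB k || pvIsC k))]

-- ===== PRECONDITION & SPEC =====
def Spec_ordena_ABC (lista : List (List String)) (out : List (List String)) : Prop := out = ordena_ABC_alt lista
instance (lista : List (List String)) (out : List (List String)) : Decidable (Spec_ordena_ABC lista out) := by unfold Spec_ordena_ABC; infer_instance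

-- ===== CLAIM (what is proved, stated in full; the proofs are below) =====
def Claim_equal_ordena_ABC : Prop := ∀ (lista : List (List String)), Dom_ordena_ABC lista → Spec_ordena_ABC lista (ordena_ABC lista)

-- ===== LEMMAS AND PROOFS =====
-- pvIsB (resp. pvIsC) strings are never pvIsA (resp. pvIsA/pvIsB): a string's first char decides
-- a list starting with char c cannot also start with a different char d
theorem prefix_single_excl {l : List Char} {c d : Char} (hcd : c ≠ d) (h : [c] <+: l) :
    ¬ [d] <+: l := by
  rcases h with ⟨t, rfl⟩
  rintro ⟨u, hu⟩
  simp only [List.singleton_append, List.cons.injEq] at hu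
  exact hcd hu.1.symm

theorem pvIsA_not_pvIsB (k : String) (h : pvIsA k = true) : pvIsB k = false := by
  simp [pvIsA, pvIsB, PySem.Chars.startswith_iff, Bool.eq_false_iff] at *
  rcases h with h | h <;>
    exact ⟨prefix_single_excl (by decide) h, prefix_single_excl (by decide) h⟩

theorem pvIsA_not_pvIsC (k : String) (h : pvIsA k = true) : pvIsC k = false := by
  simp [pvIsA, pvIsC, PySem.Chars.startswith_iff, Bool.eq_false_iff] at *
  rcases h with h | h <;>
    exact ⟨prefix_single_excl (by decide) h, prefix_single_excl (by decide) h⟩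

theorem pvIsB_not_pvIsC (k : String) (h : pvIsB k = true) : pvIsC k = false := by
  simp [pvIsB, pvIsC, PySem.Chars.startswith_iff, Bool.eq_false_iff] at *
  rcases h with h | h <;>
    exact ⟨prefix_single_excl (by decide) h, prefix_single_excl (by decide) h⟩

-- the inner loop over one sublist l, from any state: each bucket gains l's matching elements
theorem foldl_pvStepA (l : List String)
    (st : List String × List String × List String × List String) :
    l.foldl pvStepA st =
      (st.1 ++ l.filter (fun k => pvIsA k),
       st.2.1 ++ l.filter (fun k => pvIsB k),
       st.2.2.1 ++ l.filter (fun k => pvIsC k),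
       st.2.2.2 ++ l.filter (fun k => !(pvIsA k || pvIsB k || pvIsC k))) := by
  induction l generalizing st with
  | nil => simp
  | cons k t ih =>
    simp only [List.foldl_cons, ih, pvStepA]
    by_cases hA : pvIsA k = true
    · simp [hA, pvIsA_not_pvIsB k hA, pvIsA_not_pvIsC k hA]
    · by_cases hB : pvIsB k = true
      · simp [hA, hB, pvIsB_not_pvIsC k hB]
      · by_cases hC : pvIsC k = true
        · simp [hA, hB, hC]
        · simp [hA, hB, hC]

-- the outer loop = the inner-loop characterisation over the flattened list
theorem foldl_foldl_pvStepA (lista : List (List String))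
    (st : List String × List String × List String × List String) :
    lista.foldl (fun st i => i.foldl pvStepA st) st =
      (lista.flatMap (fun i => i)).foldl pvStepA st := by
  induction lista generalizing st with
  | nil => simp
  | cons i t ih => simp [ih, List.foldl_append]

-- ===== VERDICT (by name: the statement is the Claim_ definition above) =====
theorem ordena_ABC_spec : Claim_equal_ordena_ABC := by
  intro lista _
  unfold Spec_ordena_ABC ordena_ABC ordena_ABC_alt
  rw [foldl_foldl_pvStepA, foldl_pvStepA]
  simp
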